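-- pv_equiv track=rewrite | github.com/PalaashAgrawal/NSD_exploration | buildRDM.py | get_chunkified_stimulus_order
-- ===== SOURCE A (Python) =====
-- def get_chunkified_stimulus_order(stimulus_order:dict):
-- 	f'Its easier to access all the files from a hdf5 file at once rather than opening the hdf5 file repeatedly for each stimulus. Helper function for that'
-- 	chunks = {}
-- 	for order in stimulus_order:
-- 		session = order//750 + 1 #session files are 1-ordered
-- 		if session not in chunks: chunks[session] = [(order-1)%750]
-- 		else: chunks[session].append((order-1)%750)
-- 		#order is provided as 1-ordered. But to access them efficiently, we convert them to 0 ordered.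
--
-- 	for session in sorted(chunks.keys()): yield session,chunks[session]
-- ===== SOURCE B (Python) =====
-- def get_chunkified_stimulus_order(stimulus_order: dict):
--     # Stable-sort the orders by session bucket, then emit consecutive groups.
--     ordered = sorted(stimulus_order, key=lambda o: o // 750)
--     i, n = 0, len(ordered)
--     while i < n:
--         s = ordered[i] // 750
--         group = []
--         while i < n and ordered[i] // 750 == s:
--             group.append((ordered[i] - 1) % 750)
--             i += 1
--         yield s + 1, group
-- ===== Notes on version B (the rewrite author's own statement) =====
-- stated objective: alternative
-- what changed: Replaces dict-accumulation followed by sorting the session keys with a stable sort of the orders keyed by session bucket and a single scan that emits consecutive groups.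
import Mathlib
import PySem

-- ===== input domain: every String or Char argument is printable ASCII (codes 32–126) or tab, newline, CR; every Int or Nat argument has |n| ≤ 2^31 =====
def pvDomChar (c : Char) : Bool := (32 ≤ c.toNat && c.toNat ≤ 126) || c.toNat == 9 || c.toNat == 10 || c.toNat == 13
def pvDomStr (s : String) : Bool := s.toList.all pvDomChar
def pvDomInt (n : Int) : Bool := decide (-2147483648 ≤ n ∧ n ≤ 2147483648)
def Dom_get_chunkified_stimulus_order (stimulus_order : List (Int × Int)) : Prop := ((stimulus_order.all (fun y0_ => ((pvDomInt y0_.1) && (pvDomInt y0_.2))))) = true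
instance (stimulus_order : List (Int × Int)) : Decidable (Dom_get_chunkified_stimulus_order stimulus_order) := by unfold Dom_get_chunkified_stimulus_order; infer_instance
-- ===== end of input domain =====

-- B replaces A's dict-accumulate-then-sort-keys with a stable sort by session bucket
-- followed by one scan over consecutive groups (objective: alternative; same cost class).

-- ===== PORT A =====
-- 'for order in stimulus_order' iterates the dict's keys (insertion order, unique).
def get_chunkified_stimulus_order (stimulus_order : List (Int × Int)) : List (Int × List Int) :=
  let chunks := (PySem.Dict.ofList stimulus_order).keys.foldl (fun d o =>
    let session := PySem.Int.floordiv o 750 + 1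
    if d.contains session = false then d.insert session [PySem.Int.mod (o - 1) 750]
    else d.insert session (d.getD session [] ++ [PySem.Int.mod (o - 1) 750])) PySem.Dict.empty
  (PySem.List.sorted chunks.keys (fun s => s) false).map (fun session => (session, chunks.getD session []))

-- ===== PORT B =====
-- the outer while-loop of Source B: one group (inner while = takeWhile) per step, rest by recursion
def chunkifyGroups (l : List Int) : List (Int × List Int) :=
  match l with
  | [] => []
  | o :: rest =>
    let s := PySem.Int.floordiv o 750
    (s + 1, ((o :: rest).takeWhile (fun x => PySem.Int.floordiv x 750 == s)).map
        (fun x => PySem.Int.mod (x - 1) 750)) ::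
      chunkifyGroups ((o :: rest).dropWhile (fun x => PySem.Int.floordiv x 750 == s))
termination_by l.length
decreasing_by
  simp only [List.dropWhile_cons, beq_self_eq_true, if_true, List.length_cons]
  exact Nat.lt_succ_of_le (List.length_dropWhile_le _ _)

def get_chunkified_stimulus_order_alt (stimulus_order : List (Int × Int)) : List (Int × List Int) :=
  chunkifyGroups (PySem.List.sorted (PySem.Dict.ofList stimulus_order).keys
    (fun o => PySem.Int.floordiv o 750) false)

-- ===== PRECONDITION & SPEC =====
def Spec_get_chunkified_stimulus_order (stimulus_order : List (Int × Int)) (out : List (Int × List Int)) : Prop := out = get_chunkified_stimulus_order_alt stimulus_order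
instance (stimulus_order : List (Int × Int)) (out : List (Int × List Int)) : Decidable (Spec_get_chunkified_stimulus_order stimulus_order out) := by unfold Spec_get_chunkified_stimulus_order; infer_instance

-- ===== CLAIM (what is proved, stated in full; the proofs are below) =====
def Claim_equal_get_chunkified_stimulus_order : Prop := ∀ (stimulus_order : List (Int × Int)), Dom_get_chunkified_stimulus_order stimulus_order → Spec_get_chunkified_stimulus_order stimulus_order (get_chunkified_stimulus_order stimulus_order)

-- ===== LEMMAS AND PROOFS =====

lemma pv_add_mem (acc : PySem.Set Int) (x : Int) (h : x ∈ acc) : PySem.Set.add acc x = acc := by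
  simp [PySem.Set.add, h]
lemma pv_add_not_mem (acc : PySem.Set Int) (x : Int) (h : x ∉ acc) : PySem.Set.add acc x = acc ++ [x] := by
  simp [PySem.Set.add, h]

lemma pv_foldl_add_absorb (t : List Int) : ∀ (acc : PySem.Set Int),
    (∀ x ∈ t, x ∈ acc) → t.foldl PySem.Set.add acc = acc := by
  induction t with
  | nil => simp
  | cons a t ih =>
    intro acc h
    rw [List.foldl_cons, pv_add_mem acc a (h a (by simp))]
    exact ih acc (fun x hx => h x (by simp [hx]))

lemma pv_foldl_add_cons (t : List Int) : ∀ (a : Int) (acc : PySem.Set Int), a ∉ t →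
    t.foldl PySem.Set.add (a :: acc) = a :: t.foldl PySem.Set.add acc := by
  induction t with
  | nil => simp
  | cons b t ih =>
    intro a acc hb
    have hba : b ≠ a := fun h => hb (by simp [h])
    have hbt : a ∉ t := fun h => hb (by simp [h])
    have hstep : PySem.Set.add (a :: acc) b = a :: PySem.Set.add acc b := by
      by_cases h : b ∈ acc
      · rw [pv_add_mem acc b h, pv_add_mem (a :: acc) b (by simp [h])]
      · rw [pv_add_not_mem acc b h, pv_add_not_mem (a :: acc) b (by simp [h, hba]),
          List.cons_append]
    rw [List.foldl_cons, List.foldl_cons, hstep, ih a _ hbt]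

lemma pv_dropWhile_gt (k : Int → Int) (c : Int) :
    ∀ (L : List Int), L.Pairwise (fun a b => k a ≤ k b) → (∀ x ∈ L, c ≤ k x) →
      ∀ x ∈ L.dropWhile (fun y => k y == c), c < k x := by
  intro L
  induction L with
  | nil => simp
  | cons a t ih =>
    intro hp hlo
    rw [List.dropWhile_cons]
    by_cases hc : k a = c
    · simp only [hc, beq_self_eq_true, if_true]
      exact ih (hp.of_cons) (fun x hx => hc ▸ (List.pairwise_cons.mp hp).1 x hx)
    · simp only [beq_eq_false_iff_ne.mpr hc]
      intro x hx
      rcases List.mem_cons.mp hx with rfl | hx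
      · exact lt_of_le_of_ne (hlo x (by simp)) (Ne.symm hc)
      · exact lt_of_lt_of_le (lt_of_le_of_ne (hlo a (by simp)) (Ne.symm hc))
          ((List.pairwise_cons.mp hp).1 x hx)

lemma pv_ofList_sorted_decomp (k : Int → Int) (a : Int) (t : List Int)
    (hp : (a :: t).Pairwise (fun x y => k x ≤ k y)) :
    PySem.Set.ofList ((a :: t).map k) =
      k a :: PySem.Set.ofList (((a :: t).dropWhile (fun y => k y == k a)).map k) := by
  have hT : ∀ x ∈ (t.takeWhile (fun y => k y == k a)).map k, x = k a := by
    intro x hx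
    rcases List.mem_map.mp hx with ⟨y, hy, rfl⟩
    have h1 := List.mem_takeWhile_imp (l := t) (p := fun z => k z == k a) hy
    exact eq_of_beq h1
  have hD : ∀ x ∈ t.dropWhile (fun y => k y == k a), k a < k x :=
    pv_dropWhile_gt k (k a) t hp.of_cons
      (fun x hx => (List.pairwise_cons.mp hp).1 x hx)
  have hdw : (a :: t).dropWhile (fun y => k y == k a) = t.dropWhile (fun y => k y == k a) := by
    rw [List.dropWhile_cons]; simp
  rw [hdw]
  have hsplit : t = t.takeWhile (fun y => k y == k a) ++ t.dropWhile (fun y => k y == k a) :=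
    (List.takeWhile_append_dropWhile).symm
  show List.foldl PySem.Set.add PySem.Set.empty ((a :: t).map k) = _
  rw [List.map_cons, List.foldl_cons]
  have h0 : PySem.Set.add PySem.Set.empty (k a) = [k a] := by
    rw [pv_add_not_mem _ _ (by simp [PySem.Set.empty])]; rfl
  rw [h0]
  conv_lhs => rw [hsplit]
  rw [List.map_append, List.foldl_append,
    pv_foldl_add_absorb _ [k a] (fun x hx => by simp [hT x hx]),
    pv_foldl_add_cons _ (k a) [] (by
      intro hmem
      rcases List.mem_map.mp hmem with ⟨y, hy, hyy⟩
      exact absurd hyy (ne_of_gt (hD y hy)))]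
  rfl

lemma pv_ofList_pairwise_lt : ∀ (l : List Int), l.Pairwise (· ≤ ·) →
    (PySem.Set.ofList l).Pairwise (· < ·) := by
  intro l
  induction hn : l.length using Nat.strong_induction_on generalizing l with
  | _ n ih =>
    match l with
    | [] => intro _; simp [PySem.Set.ofList, PySem.Set.empty]
    | a :: t =>
      intro hp
      have hdecomp := pv_ofList_sorted_decomp (fun x => x) a t (by simpa using hp)
      simp only [List.map_id_fun', id] at hdecomp
      rw [hdecomp, List.pairwise_cons]
      have hdw : (a :: t).dropWhile (fun y => y == a) = t.dropWhile (fun y => y == a) := by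
        rw [List.dropWhile_cons]; simp
      rw [hdw]
      have hD : ∀ x ∈ t.dropWhile (fun y => y == a), a < x :=
        pv_dropWhile_gt (fun x => x) a t hp.of_cons (fun x hx => (List.pairwise_cons.mp hp).1 x hx)
      constructor
      · intro x hx
        exact hD x ((PySem.Set.mem_ofList _ x).mp hx)
      · exact ih (t.dropWhile (fun y => y == a)).length
          (by subst hn; simpa using Nat.lt_succ_of_le (List.length_dropWhile_le _ _)) _
          rfl (hp.of_cons.sublist (List.dropWhile_sublist _))

lemma pv_insertBy_filter (k : Int → Int) (c x : Int) : ∀ (l : List Int),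
    l.Pairwise (fun a b => k a ≤ k b) →
    (PySem.List.insertBy (fun a b => decide (k a < k b)) x l).filter (fun o => k o == c) =
      l.filter (fun o => k o == c) ++ (if k x == c then [x] else []) := by
  intro l
  induction l with
  | nil => simp [PySem.List.insertBy]; split <;> simp_all
  | cons y ys ih =>
    intro hp
    show (if decide (k x < k y) = true then x :: y :: ys
        else y :: PySem.List.insertBy (fun a b => decide (k a < k b)) x ys).filter
        (fun o => k o == c) = _
    by_cases hlt : k x < k y
    · simp only [hlt, decide_true, if_true]
      by_cases hc : k x = c
      · have hys : ∀ z ∈ y :: ys, ¬ (k z == c) = true := by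
          intro z hz hzc
          have h1 : k x < k z := by
            rcases List.mem_cons.mp hz with rfl | hz'
            · exact hlt
            · exact lt_of_lt_of_le hlt ((List.pairwise_cons.mp hp).1 z hz')
          have : k z = c := eq_of_beq hzc
          omega
        rw [List.filter_cons_of_pos (by simpa using hc),
          List.filter_eq_nil_iff.mpr hys]
        simp [hc]
      · rw [List.filter_cons_of_neg (by simpa using hc)]
        simp [beq_eq_false_iff_ne.mpr hc]
    · simp only [hlt, decide_false, Bool.false_eq_true, if_false]
      rw [List.filter_cons, List.filter_cons, ih hp.of_cons]
      split <;> simp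

lemma pv_sorted_filter (k : Int → Int) (c : Int) (xs : List Int) :
    (PySem.List.sorted xs k false).filter (fun o => k o == c) =
      xs.filter (fun o => k o == c) := by
  induction xs using List.reverseRecOn with
  | nil => rfl
  | append_singleton xs x ih =>
    have hfold : PySem.List.sorted (xs ++ [x]) k false =
        PySem.List.insertBy (fun a b => decide (k a < k b)) x (PySem.List.sorted xs k false) := by
      rw [PySem.List.sorted_eq_foldl_insertBy, PySem.List.sorted_eq_foldl_insertBy,
        List.foldl_append]
      rfl
    rw [hfold, pv_insertBy_filter k c x _ (PySem.List.sorted_pairwise xs k), ih,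
      List.filter_append]
    congr 1
    by_cases h : k x = c
    · simp [List.filter, h]
    · simp [List.filter, beq_eq_false_iff_ne.mpr h]


lemma pv_chunkifyGroups_eq : ∀ (L : List Int),
    L.Pairwise (fun a b => PySem.Int.floordiv a 750 ≤ PySem.Int.floordiv b 750) →
    chunkifyGroups L = (PySem.Set.ofList (L.map (fun o => PySem.Int.floordiv o 750))).map
      (fun s => (s + 1, (L.filter (fun o => PySem.Int.floordiv o 750 == s)).map
        (fun o => PySem.Int.mod (o - 1) 750))) := by
  intro L
  induction hn : L.length using Nat.strong_induction_on generalizing L with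
  | _ n ih =>
    match L with
    | [] => intro _; simp [chunkifyGroups, PySem.Set.ofList, PySem.Set.empty]
    | o :: rest =>
      intro hp
      have hT : ∀ x ∈ rest.takeWhile
          (fun y => PySem.Int.floordiv y 750 == PySem.Int.floordiv o 750),
          PySem.Int.floordiv x 750 = PySem.Int.floordiv o 750 := by
        intro x hx
        have h1 := List.mem_takeWhile_imp (l := rest)
          (p := fun y => PySem.Int.floordiv y 750 == PySem.Int.floordiv o 750) hx
        exact eq_of_beq h1
      have hD : ∀ x ∈ rest.dropWhile
          (fun y => PySem.Int.floordiv y 750 == PySem.Int.floordiv o 750),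
          PySem.Int.floordiv o 750 < PySem.Int.floordiv x 750 :=
        pv_dropWhile_gt (fun y => PySem.Int.floordiv y 750) (PySem.Int.floordiv o 750) rest
          hp.of_cons (fun x hx => (List.pairwise_cons.mp hp).1 x hx)
      have hdw : (o :: rest).dropWhile
            (fun y => PySem.Int.floordiv y 750 == PySem.Int.floordiv o 750) =
          rest.dropWhile (fun y => PySem.Int.floordiv y 750 == PySem.Int.floordiv o 750) := by
        rw [List.dropWhile_cons]; simp
      have htw : (o :: rest).takeWhile
            (fun y => PySem.Int.floordiv y 750 == PySem.Int.floordiv o 750) =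
          o :: rest.takeWhile (fun y => PySem.Int.floordiv y 750 == PySem.Int.floordiv o 750) := by
        rw [List.takeWhile_cons]; simp
      rw [chunkifyGroups]
      rw [pv_ofList_sorted_decomp (fun y => PySem.Int.floordiv y 750) o rest hp, List.map_cons]
      congr 1
      · -- heads agree
        congr 1
        rw [htw]
        have hsplit : rest = rest.takeWhile
              (fun y => PySem.Int.floordiv y 750 == PySem.Int.floordiv o 750) ++
            rest.dropWhile (fun y => PySem.Int.floordiv y 750 == PySem.Int.floordiv o 750) :=
          (List.takeWhile_append_dropWhile).symm
        conv_rhs => rw [hsplit]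
        rw [List.filter_cons_of_pos (by simp), List.filter_append,
          List.filter_eq_self.mpr (fun x hx => beq_of_eq (hT x hx)),
          List.filter_eq_nil_iff.mpr (fun x hx hc =>
            (ne_of_gt (hD x hx)) (eq_of_beq hc)),
          List.append_nil]
      · -- tails agree
        rw [hdw]
        rw [ih (rest.dropWhile
            (fun y => PySem.Int.floordiv y 750 == PySem.Int.floordiv o 750)).length
          (by subst hn; simpa using Nat.lt_succ_of_le (List.length_dropWhile_le _ _)) _ rfl
          (hp.of_cons.sublist (List.dropWhile_sublist _))]
        apply List.map_congr_left
        intro s hs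
        rcases List.mem_map.mp ((PySem.Set.mem_ofList _ s).mp hs) with ⟨d, hd, rfl⟩
        congr 1
        have hsplit : rest = rest.takeWhile
              (fun y => PySem.Int.floordiv y 750 == PySem.Int.floordiv o 750) ++
            rest.dropWhile (fun y => PySem.Int.floordiv y 750 == PySem.Int.floordiv o 750) :=
          (List.takeWhile_append_dropWhile).symm
        have hne : PySem.Int.floordiv o 750 ≠ PySem.Int.floordiv d 750 := ne_of_lt (hD d hd)
        have hsplit' : o :: rest = o :: (rest.takeWhile
              (fun y => PySem.Int.floordiv y 750 == PySem.Int.floordiv o 750) ++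
            rest.dropWhile (fun y => PySem.Int.floordiv y 750 == PySem.Int.floordiv o 750)) := by
          rw [← hsplit]
        conv_rhs => rw [hsplit']
        rw [List.filter_cons_of_neg
            (p := fun z => PySem.Int.floordiv z 750 == PySem.Int.floordiv d 750) (a := o)
            (fun hc => hne (eq_of_beq hc)),
          List.filter_append,
          show (rest.takeWhile
              (fun y => PySem.Int.floordiv y 750 == PySem.Int.floordiv o 750)).filter
              (fun z => PySem.Int.floordiv z 750 == PySem.Int.floordiv d 750) = [] from
            List.filter_eq_nil_iff.mpr (fun x hx hc =>
              hne (by rw [← hT x hx]; exact eq_of_beq hc)),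
          List.nil_append]

-- A's loop body equals one dict 'modify' per element
lemma pv_A_step_eq (d : PySem.Dict Int (List Int)) (o : Int) :
    (let session := PySem.Int.floordiv o 750 + 1
     if d.contains session = false then d.insert session [PySem.Int.mod (o - 1) 750]
     else d.insert session (d.getD session [] ++ [PySem.Int.mod (o - 1) 750])) =
    d.modify (PySem.Int.floordiv o 750 + 1) [] (· ++ [PySem.Int.mod (o - 1) 750]) := by
  show (if d.contains (PySem.Int.floordiv o 750 + 1) = false then _ else _) = _
  by_cases h : d.contains (PySem.Int.floordiv o 750 + 1) = false
  · rw [if_pos h, PySem.Dict.modify, PySem.Dict.getD_of_not_contains (h := h), List.nil_append]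
  · rw [if_neg h, PySem.Dict.modify]

lemma pv_A_eq (ks : List Int) :
    (PySem.List.sorted (ks.foldl (fun d o =>
        let session := PySem.Int.floordiv o 750 + 1
        if d.contains session = false then d.insert session [PySem.Int.mod (o - 1) 750]
        else d.insert session (d.getD session [] ++ [PySem.Int.mod (o - 1) 750])) PySem.Dict.empty).keys
        (fun s => s) false).map
      (fun session => (session, (ks.foldl (fun d o =>
        let session := PySem.Int.floordiv o 750 + 1
        if d.contains session = false then d.insert session [PySem.Int.mod (o - 1) 750]
        else d.insert session (d.getD session [] ++ [PySem.Int.mod (o - 1) 750])) PySem.Dict.empty).getD session [])) =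
    (PySem.List.sorted (PySem.Set.ofList (ks.map (fun o => PySem.Int.floordiv o 750 + 1)))
        (fun s => s) false).map
      (fun s => (s, (ks.filter (fun o => PySem.Int.floordiv o 750 + 1 == s)).map
        (fun o => PySem.Int.mod (o - 1) 750))) := by
  have hfold : (ks.foldl (fun d o =>
      let session := PySem.Int.floordiv o 750 + 1
      if d.contains session = false then d.insert session [PySem.Int.mod (o - 1) 750]
      else d.insert session (d.getD session [] ++ [PySem.Int.mod (o - 1) 750])) PySem.Dict.empty) =
      ks.foldl (fun d o => d.modify (PySem.Int.floordiv o 750 + 1) []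
        (· ++ [PySem.Int.mod (o - 1) 750])) PySem.Dict.empty := by
    apply PySem.List.foldl_congr_mem
    intro d o _
    exact pv_A_step_eq d o
  rw [hfold]
  have hkeys : (ks.foldl (fun d o => d.modify (PySem.Int.floordiv o 750 + 1) []
      (· ++ [PySem.Int.mod (o - 1) 750])) PySem.Dict.empty).keys =
      PySem.Set.ofList (ks.map (fun o => PySem.Int.floordiv o 750 + 1)) := by
    rw [PySem.Dict.keys_foldl_modify_key ks (fun o => PySem.Int.floordiv o 750 + 1) []
      (fun _ o => (· ++ [PySem.Int.mod (o - 1) 750])) PySem.Dict.empty]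
    rw [PySem.Dict.keys_empty]
    rfl
  rw [hkeys]
  apply List.map_congr_left
  intro s _
  congr 1
  have hmap : ks.foldl (fun d o => d.modify (PySem.Int.floordiv o 750 + 1) []
      (· ++ [PySem.Int.mod (o - 1) 750])) PySem.Dict.empty =
      (ks.map (fun o => (PySem.Int.floordiv o 750 + 1, PySem.Int.mod (o - 1) 750))).foldl
        (fun d p => d.modify p.1 [] (· ++ [p.2])) PySem.Dict.empty := by
    rw [List.foldl_map]
  rw [hmap, PySem.Dict.getD_foldl_modify_append, PySem.Dict.getD_empty, List.nil_append,
    List.filter_map]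
  rw [List.map_map]
  rfl

lemma pv_beq_shift (a S : Int) : (a + 1 == S) = (a == S - 1) := by
  by_cases h : a + 1 = S
  · rw [beq_iff_eq.mpr h, beq_iff_eq.mpr (by omega)]
  · rw [beq_eq_false_iff_ne.mpr h, beq_eq_false_iff_ne.mpr (by omega)]

lemma pv_main (ks : List Int) :
    (PySem.List.sorted (PySem.Set.ofList (ks.map (fun o => PySem.Int.floordiv o 750 + 1)))
        (fun s => s) false).map
      (fun s => (s, (ks.filter (fun o => PySem.Int.floordiv o 750 + 1 == s)).map
        (fun o => PySem.Int.mod (o - 1) 750))) =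
    chunkifyGroups (PySem.List.sorted ks (fun o => PySem.Int.floordiv o 750) false) := by
  set L := PySem.List.sorted ks (fun o => PySem.Int.floordiv o 750) false with hL
  have hperm : L.Perm ks := PySem.List.sorted_perm ks _ false
  have hpw : L.Pairwise (fun a b => PySem.Int.floordiv a 750 ≤ PySem.Int.floordiv b 750) :=
    PySem.List.sorted_pairwise ks _
  rw [pv_chunkifyGroups_eq L hpw]
  -- name the sorted set of sessions
  have hset : PySem.List.sorted (PySem.Set.ofList (ks.map (fun o => PySem.Int.floordiv o 750 + 1)))
      (fun s => s) false =
      (PySem.Set.ofList (L.map (fun o => PySem.Int.floordiv o 750))).map (· + 1) := by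
    apply PySem.List.sorted_eq_of_perm_of_pairwise_lt
    · apply (List.perm_ext_iff_of_nodup ?_ ?_).mpr
      · intro S
        simp only [List.mem_map, PySem.Set.mem_ofList]
        constructor
        · rintro ⟨s, ⟨o, ho, rfl⟩, rfl⟩
          exact ⟨o, hperm.mem_iff.mp ho, rfl⟩
        · rintro ⟨o, ho, rfl⟩
          exact ⟨PySem.Int.floordiv o 750, ⟨o, hperm.mem_iff.mpr ho, rfl⟩, rfl⟩
      · exact (PySem.Set.nodup_ofList _).map (fun a b h => by omega)
      · exact PySem.Set.nodup_ofList _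
    · have hlt := pv_ofList_pairwise_lt (L.map (fun o => PySem.Int.floordiv o 750))
        (PySem.List.sorted_map_key_pairwise ks _)
      exact (List.pairwise_map.mpr (hlt.imp (fun h => by omega)))
  rw [hset, List.map_map]
  apply List.map_congr_left
  intro s _
  show (s + 1, _) = (s + 1, _)
  congr 1
  have hstab := pv_sorted_filter (fun o => PySem.Int.floordiv o 750) s ks
  rw [← hL] at hstab
  rw [hstab]
  congr 1
  apply List.filter_congr
  intro o _
  show (PySem.Int.floordiv o 750 + 1 == s + 1) = (PySem.Int.floordiv o 750 == s)
  rw [pv_beq_shift]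
  congr 1
  omega

-- ===== VERDICT (by name: the statement is the Claim_ definition above) =====
theorem get_chunkified_stimulus_order_spec : Claim_equal_get_chunkified_stimulus_order := by
  intro so _
  show get_chunkified_stimulus_order so = get_chunkified_stimulus_order_alt so
  unfold get_chunkified_stimulus_order get_chunkified_stimulus_order_alt
  exact (pv_A_eq _).trans (pv_main _)
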